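-- pv_equiv track=rewrite | github.com/Simon-Mufara/SA_Digi_Health | fastapi_backend/app/api/v1/analytics.py | classify_disease_group
-- ===== SOURCE A (Python) =====
-- from typing import Optional
--
-- DISEASE_GROUPS = {
--     "ALRI": ["J06", "J18", "J20", "J21", "J22"],  # Acute Lower Respiratory Infections
--     "HIV": ["B20", "B21", "B22", "B23", "B24", "Z21"],
--     "TB": ["A15", "A16", "A17", "A18", "A19"],
--     "NCD": ["I10", "I25", "E11", "E78", "J45"],  # Non-Communicable Diseases (Hypertension, Diabetes, etc.)
--     "Maternal": ["O00", "O80", "O82", "Z34", "Z35"],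
--     "Injury": ["S00", "S01", "S02", "T00", "T14"],
--     "Mental Health": ["F20", "F32", "F33", "F41"],
--     "Other": []  # Catch-all
-- }
--
-- def classify_disease_group(icd10_code: Optional[str]) -> str:
--     """Classify ICD-10 code into PHDC disease group."""
--     if not icd10_code:
--         return "Other"
--     code = icd10_code.upper().strip()
--     for group, prefixes in DISEASE_GROUPS.items():
--         for prefix in prefixes:
--             if code.startswith(prefix):
--                 return group
--     return "Other"
-- ===== SOURCE B (Python) =====
-- from typing import Optional
--
-- DISEASE_GROUPS = {
--     "ALRI": ["J06", "J18", "J20", "J21", "J22"],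
--     "HIV": ["B20", "B21", "B22", "B23", "B24", "Z21"],
--     "TB": ["A15", "A16", "A17", "A18", "A19"],
--     "NCD": ["I10", "I25", "E11", "E78", "J45"],
--     "Maternal": ["O00", "O80", "O82", "Z34", "Z35"],
--     "Injury": ["S00", "S01", "S02", "T00", "T14"],
--     "Mental Health": ["F20", "F32", "F33", "F41"],
--     "Other": []
-- }
--
-- PREFIX_TO_GROUP = {p: g for g, ps in DISEASE_GROUPS.items() for p in ps}
--
-- def classify_disease_group(icd10_code: Optional[str]) -> str:
--     """Classify ICD-10 code into PHDC disease group (flat prefix index, O(1) lookup)."""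
--     if not icd10_code:
--         return "Other"
--     code = icd10_code.upper().strip()
--     return PREFIX_TO_GROUP.get(code[:3], "Other")
-- ===== Notes on version B (the rewrite author's own statement) =====
-- stated objective: simpler
-- what changed: Replaces A's nested scan over DISEASE_GROUPS with a flat prefix-to-group dictionary built once, so classification is a single dict lookup of the first three characters (with the same catch-all default) instead of a double loop of startswith tests; valid because every prefix is exactly 3 characters.
import Mathlib
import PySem

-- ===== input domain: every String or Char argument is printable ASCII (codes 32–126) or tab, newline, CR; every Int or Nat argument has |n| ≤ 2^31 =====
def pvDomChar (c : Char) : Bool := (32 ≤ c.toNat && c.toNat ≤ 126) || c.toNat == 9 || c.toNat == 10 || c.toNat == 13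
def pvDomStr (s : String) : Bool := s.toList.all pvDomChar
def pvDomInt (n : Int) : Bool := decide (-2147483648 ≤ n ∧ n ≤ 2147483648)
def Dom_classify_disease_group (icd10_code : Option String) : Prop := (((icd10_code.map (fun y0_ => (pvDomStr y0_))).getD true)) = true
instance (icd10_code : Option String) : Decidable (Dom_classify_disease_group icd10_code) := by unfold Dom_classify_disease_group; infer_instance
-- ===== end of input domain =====

-- B replaces A's nested scan over DISEASE_GROUPS with one prebuilt flat prefix→group dictionary and a single lookup of code[:3] (objective: simpler).

-- ===== PORT A =====
-- DISEASE_GROUPS, in Python's dict insertion order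
def pvDiseaseGroups : List (String × List String) :=
  [("ALRI", ["J06", "J18", "J20", "J21", "J22"]),
   ("HIV", ["B20", "B21", "B22", "B23", "B24", "Z21"]),
   ("TB", ["A15", "A16", "A17", "A18", "A19"]),
   ("NCD", ["I10", "I25", "E11", "E78", "J45"]),
   ("Maternal", ["O00", "O80", "O82", "Z34", "Z35"]),
   ("Injury", ["S00", "S01", "S02", "T00", "T14"]),
   ("Mental Health", ["F20", "F32", "F33", "F41"]),
   ("Other", [])]

-- inner 'for prefix in prefixes: if code.startswith(prefix): return group'
def pvScanPrefixes (code : List Char) (g : String) : List String → Option String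
  | [] => none
  | p :: rest => if PySem.Chars.startswith code p.toList then some g else pvScanPrefixes code g rest

-- outer 'for group, prefixes in DISEASE_GROUPS.items(): …'; falls through to "Other"
def pvScanGroups (code : List Char) : List (String × List String) → String
  | [] => "Other"
  | (g, ps) :: rest =>
    match pvScanPrefixes code g ps with
    | some r => r
    | none => pvScanGroups code rest

def classify_disease_group (icd10_code : Option String) : String :=
  match icd10_code with
  | none => "Other"                         -- 'if not icd10_code' (None)
  | some s =>
    if s.toList = [] then "Other"           -- 'if not icd10_code' (empty string)
    else pvScanGroups (PySem.Chars.strip (PySem.Chars.upper s.toList)) pvDiseaseGroups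

-- ===== PORT B =====
-- PREFIX_TO_GROUP = {p: g for g, ps in DISEASE_GROUPS.items() for p in ps} (keys as List Char, the proving-side string representation)
def pvPrefixToGroup : PySem.Dict (List Char) String :=
  pvDiseaseGroups.foldl (fun d gp => gp.2.foldl (fun d p => d.insert p.toList gp.1) d) PySem.Dict.empty

def classify_disease_group_alt (icd10_code : Option String) : String :=
  match icd10_code with
  | none => "Other"
  | some s =>
    if s.toList = [] then "Other"
    else
      -- PREFIX_TO_GROUP.get(code[:3], "Other")
      PySem.Dict.getD pvPrefixToGroup
        (PySem.List.slice (PySem.Chars.strip (PySem.Chars.upper s.toList)) none (some 3)) "Other"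

-- ===== PRECONDITION & SPEC =====
def Spec_classify_disease_group (icd10_code : Option String) (out : String) : Prop := out = classify_disease_group_alt icd10_code
instance (icd10_code : Option String) (out : String) : Decidable (Spec_classify_disease_group icd10_code out) := by unfold Spec_classify_disease_group; infer_instance

-- ===== CLAIM (what is proved, stated in full; the proofs are below) =====
def Claim_equal_classify_disease_group : Prop := ∀ (icd10_code : Option String), Dom_classify_disease_group icd10_code → Spec_classify_disease_group icd10_code (classify_disease_group icd10_code)

-- ===== LEMMAS AND PROOFS =====

-- code.startswith(p) tests equality of the first p.length characters
theorem pv_sw_take (cs p : List Char) :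
    PySem.Chars.startswith cs p = (p == cs.take p.length) := by
  rcases Bool.eq_false_or_eq_true (PySem.Chars.startswith cs p) with hb | hb <;> rw [hb] <;> symm
  · rw [beq_iff_eq]
    exact List.prefix_iff_eq_take.mp ((PySem.Chars.startswith_iff cs p).mp hb)
  · rw [beq_eq_false_iff_ne]
    intro he
    have hp : p <+: cs := by rw [he]; exact List.take_prefix _ _
    rw [← PySem.Chars.startswith_iff] at hp; simp [hb] at hp

-- cs[:3] is take 3
theorem pv_slice3 (cs : List Char) : PySem.List.slice cs none (some 3) = cs.take 3 := by
  simp [PySem.List.slice, PySem.List.clampIdx]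

-- the flat list of (prefix, group) pairs in scan order
def pvFlat (G : List (String × List String)) : List (List Char × String) :=
  G.flatMap (fun gp => gp.2.map (fun p => (p.toList, gp.1)))

-- building the dict by insertion = the flat association list (keys are distinct literals)
set_option maxRecDepth 8192 in
theorem pv_dict_items : pvPrefixToGroup = PySem.Dict.mk (pvFlat pvDiseaseGroups) := by decide

-- lookup in a concatenated association list
theorem pv_get?_append (l1 l2 : List (List Char × String)) (t : List Char) :
    (PySem.Dict.mk (l1 ++ l2)).get? t = ((PySem.Dict.mk l1).get? t).or ((PySem.Dict.mk l2).get? t) := by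
  induction l1 with
  | nil => rfl
  | cons p rest ih =>
    rw [List.cons_append, PySem.Dict.get?_mk_cons, PySem.Dict.get?_mk_cons]
    by_cases h : (p.1 == t) = true
    · simp [h]
    · simp only [Bool.not_eq_true] at h; simp [h, ih]

-- the inner prefix scan is a lookup of the first three characters (all prefixes have length 3)
theorem pv_scanP (cs : List Char) (g : String) (ps : List String)
    (h : ∀ p ∈ ps, p.toList.length = 3) :
    pvScanPrefixes cs g ps = (PySem.Dict.mk (ps.map (fun p => (p.toList, g)))).get? (cs.take 3) := by
  induction ps with
  | nil => rfl
  | cons p rest ih =>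
    rw [List.map_cons, PySem.Dict.get?_mk_cons]
    simp only [pvScanPrefixes, pv_sw_take, h p (List.mem_cons_self)]
    rw [ih (fun q hq => h q (List.mem_cons_of_mem _ hq))]

-- the outer group scan is a lookup in the flat list
theorem pv_scanG (cs : List Char) (G : List (String × List String))
    (h : ∀ gp ∈ G, ∀ p ∈ gp.2, p.toList.length = 3) :
    pvScanGroups cs G = ((PySem.Dict.mk (pvFlat G)).get? (cs.take 3)).getD "Other" := by
  induction G with
  | nil => rfl
  | cons gp rest ih =>
    obtain ⟨g, ps⟩ := gp
    have h1 : ∀ p ∈ ps, p.toList.length = 3 := h (g, ps) List.mem_cons_self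
    have h2 := fun q hq => h q (List.mem_cons_of_mem _ hq)
    simp only [pvScanGroups, pvFlat, List.flatMap_cons, pv_get?_append, pv_scanP cs g ps h1]
    cases hk : (PySem.Dict.mk (ps.map (fun p => (p.toList, g)))).get? (cs.take 3) with
    | some r => rfl
    | none => simpa only [Option.or] using ih h2

-- heart of the claim: A's nested first-match scan = one lookup of the first three characters
theorem pv_scan_eq_lookup (cs : List Char) :
    pvScanGroups cs pvDiseaseGroups = PySem.Dict.getD pvPrefixToGroup (cs.take 3) "Other" := by
  rw [pv_scanG cs pvDiseaseGroups (by decide), pv_dict_items]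
  rfl

-- ===== VERDICT (by name: the statement is the Claim_ definition above) =====
theorem classify_disease_group_spec : Claim_equal_classify_disease_group := by
  intro icd10_code _
  unfold Spec_classify_disease_group classify_disease_group classify_disease_group_alt
  cases icd10_code with
  | none => rfl
  | some s =>
    dsimp only
    by_cases h : s.toList = []
    · rw [if_pos h, if_pos h]
    · rw [if_neg h, if_neg h, pv_slice3, pv_scan_eq_lookup]
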